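-- pv_equiv track=rewrite | github.com/tuhh-softsec/code2DFD | technology_specific_extractors/maven/mvn_entry.py | in_comment
-- ===== SOURCE A (Python) =====
-- def in_comment(file:list, line_nr: str) -> bool:
--     """Checks if provided line is inside a comment block in the pom.xml .
--     """
--
--     count = line_nr
--     while count >= 0:
--         if "<--" in file[count] and "-->" in file[count]:
--             return False
--         if "<--" in file[count]:
--             return True
--         if "-->" in file[count]:
--             return False
--         count -= 1
--     return False
-- ===== SOURCE B (Python) =====
-- def in_comment(file: list, line_nr: str) -> bool:
--     """Checks if provided line is inside a comment block in the pom.xml .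
--     """
--
--     state = False
--     for i, line in enumerate(file):
--         if i > line_nr:
--             break
--         has_open = "<--" in line
--         has_close = "-->" in line
--         if has_open or has_close:
--             state = has_open and not has_close
--     return state
-- ===== Notes on version B (the rewrite author's own statement) =====
-- stated objective: alternative
-- what changed: Replaces A's backward while-loop with early returns by a forward enumerate pass that keeps one boolean state (the verdict of the nearest marker line seen so far), updated from two precomputed flags has_open/has_close and with only a break past line_nr.
import Mathlib
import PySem

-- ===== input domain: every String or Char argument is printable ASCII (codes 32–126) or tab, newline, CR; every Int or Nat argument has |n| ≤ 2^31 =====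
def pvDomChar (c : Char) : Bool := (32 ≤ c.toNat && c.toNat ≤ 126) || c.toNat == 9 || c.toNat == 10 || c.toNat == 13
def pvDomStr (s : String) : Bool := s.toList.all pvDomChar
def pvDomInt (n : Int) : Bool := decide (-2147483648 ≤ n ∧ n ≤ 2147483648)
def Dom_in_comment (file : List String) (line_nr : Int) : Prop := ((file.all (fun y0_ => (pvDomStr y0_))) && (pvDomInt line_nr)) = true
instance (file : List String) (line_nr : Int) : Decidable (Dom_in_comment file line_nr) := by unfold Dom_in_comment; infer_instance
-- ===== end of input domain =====

-- B replaces A's backward early-return while-loop by a forward enumerate pass holding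
-- one boolean state (last marker line's verdict); objective: alternative decomposition.

-- ===== PORT A =====
-- A's while-loop: count walks from line_nr down to 0, returning at the first marker
-- line.  Out-of-range indexing (IndexError) is excluded by Pre_; the .getD ""
-- default is never reached inside Pre_.
def inCommentLoopA (file : List String) (count : Int) : Bool :=
  if h : 0 ≤ count then
    let line := (PySem.List.pyGet? file count).getD ""
    if PySem.Str.isIn "<--" line && PySem.Str.isIn "-->" line then false
    else if PySem.Str.isIn "<--" line then true
    else if PySem.Str.isIn "-->" line then false
    else inCommentLoopA file (count - 1)
  else false
termination_by (count + 1).toNat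
decreasing_by omega

def in_comment (file : List String) (line_nr : Int) : Bool :=
  inCommentLoopA file line_nr

-- ===== PORT B =====
-- B's 'for i, line in enumerate(file)' with a break past line_nr: structural recursion
-- over the list carrying the running index i and the state accumulator.
def inCommentLoopB (line_nr : Int) : List String → Int → Bool → Bool
  | [], _, state => state
  | line :: rest, i, state =>
      if i > line_nr then state
      else
        let hasOpen := PySem.Str.isIn "<--" line
        let hasClose := PySem.Str.isIn "-->" line
        inCommentLoopB line_nr rest (i + 1)
          (if hasOpen || hasClose then hasOpen && !hasClose else state)

def in_comment_alt (file : List String) (line_nr : Int) : Bool :=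
  inCommentLoopB line_nr file 0 false

-- ===== PRECONDITION & SPEC =====
-- Pre_ excludes exactly line_nr ≥ len(file), where the Python A raises IndexError.
def Pre_in_comment (file : List String) (line_nr : Int) : Prop :=
  line_nr < (file.length : Int)
instance (file : List String) (line_nr : Int) : Decidable (Pre_in_comment file line_nr) := by
  unfold Pre_in_comment; infer_instance

def pvWitness_in_comment : List String × Int := (["<!-- start", "<-- open", "x"], 2)

def Spec_in_comment (file : List String) (line_nr : Int) (out : Bool) : Prop := out = in_comment_alt file line_nr
instance (file : List String) (line_nr : Int) (out : Bool) : Decidable (Spec_in_comment file line_nr out) := by unfold Spec_in_comment; infer_instance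

-- ===== CLAIM (what is proved, stated in full; the proofs are below) =====
def Claim_equal_in_comment : Prop := ∀ (file : List String) (line_nr : Int), Dom_in_comment file line_nr → Pre_in_comment file line_nr → Spec_in_comment file line_nr (in_comment file line_nr)

-- ===== LEMMAS AND PROOFS =====

-- proof-side common form: a forward fold of B's one-step state update over a line list
def pvStep (state : Bool) (line : String) : Bool :=
  let hasOpen := PySem.Str.isIn "<--" line
  let hasClose := PySem.Str.isIn "-->" line
  if hasOpen || hasClose then hasOpen && !hasClose else state

-- B's indexed loop is the fold of pvStep over the first (line_nr - i + 1) lines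
theorem loopB_eq_fold (line_nr : Int) :
    ∀ (l : List String) (i : Int) (s : Bool),
      inCommentLoopB line_nr l i s = (l.take (line_nr - i + 1).toNat).foldl pvStep s := by
  intro l
  induction l with
  | nil => intro i s; simp [inCommentLoopB]
  | cons line rest ih =>
      intro i s
      rw [inCommentLoopB]
      by_cases h : i > line_nr
      · have : (line_nr - i + 1).toNat = 0 := by omega
        simp [h, this]
      · have h1 : (line_nr - i + 1).toNat = (line_nr - (i + 1) + 1).toNat + 1 := by omega
        rw [if_neg h, h1, List.take_succ_cons, List.foldl_cons, ih]
        rfl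

-- A's loop satisfies pvStep's recurrence at each nonnegative count
theorem loopA_step (file : List String) (c : Int) (h : 0 ≤ c) :
    inCommentLoopA file c = pvStep (inCommentLoopA file (c - 1))
      ((PySem.List.pyGet? file c).getD "") := by
  rw [inCommentLoopA, dif_pos h]
  unfold pvStep
  cases h1 : PySem.Str.isIn "<--" ((PySem.List.pyGet? file c).getD "") <;>
    cases h2 : PySem.Str.isIn "-->" ((PySem.List.pyGet? file c).getD "") <;>
      simp only [h1, h2] <;> simp

-- the empty line carries no marker, so pvStep leaves the state unchanged
theorem pvStep_empty (s : Bool) : pvStep s "" = s := by cases s <;> decide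

-- A's backward scan from n equals the forward fold over the first n + 1 lines
theorem loopA_eq_fold (file : List String) :
    ∀ (n : Nat), inCommentLoopA file (n : Int) = (file.take (n + 1)).foldl pvStep false := by
  intro n
  induction n with
  | zero =>
      simp only [Nat.cast_zero]
      rw [loopA_step file 0 (by omega)]
      have h0 : inCommentLoopA file (0 - 1) = false := by rw [inCommentLoopA]; norm_num
      rw [h0]
      cases file with
      | nil =>
          simp [pvStep, PySem.List.pyGet?]
          decide
      | cons a l => simp [PySem.List.pyGet?, PySem.List.pyIdx?]
  | succ k ih =>
      have hs : inCommentLoopA file ((k + 1 : Nat) : Int)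
          = pvStep (inCommentLoopA file ((k : Nat) : Int)) ((PySem.List.pyGet? file ((k + 1 : Nat) : Int)).getD "") := by
        have hc : ((k + 1 : Nat) : Int) - 1 = ((k : Nat) : Int) := by push_cast; ring
        have := loopA_step file ((k + 1 : Nat) : Int) (by positivity)
        rwa [hc] at this
      rw [hs, ih]
      by_cases hk : k + 1 < file.length
      · have hg : PySem.List.pyGet? file ((k + 1 : Nat) : Int) = some file[k + 1] := by
          rw [PySem.List.pyGet?_natCast]; exact List.getElem?_eq_getElem hk
        have ht : List.take (k + 1 + 1) file = List.take (k + 1) file ++ [file[k + 1]] := by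
          rw [List.take_add_one]
          simp [List.getElem?_eq_getElem hk]
        rw [hg, Option.getD_some, ht, List.foldl_append, List.foldl_cons, List.foldl_nil]
      · have h1 : file.take (k + 1 + 1) = file.take (k + 1) := by
          rw [List.take_of_length_le (by omega), List.take_of_length_le (by omega)]
        have h2 : PySem.List.pyGet? file ((k + 1 : Nat) : Int) = none := by
          rw [PySem.List.pyGet?_natCast, List.getElem?_eq_none_iff]; omega
        rw [h1, h2]
        exact pvStep_empty _

-- ===== VERDICT (by name: the statements are the Claim_ definitions above) =====
theorem in_comment_spec : Claim_equal_in_comment := by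
  intro file line_nr _ _
  unfold Spec_in_comment in_comment in_comment_alt
  rw [loopB_eq_fold]
  by_cases h : 0 ≤ line_nr
  · obtain ⟨n, rfl⟩ : ∃ n : Nat, line_nr = (n : Int) := ⟨line_nr.toNat, by omega⟩
    rw [loopA_eq_fold]
    have hn : ((n : Int) - 0 + 1).toNat = n + 1 := by omega
    rw [hn]
  · have h0 : (line_nr - 0 + 1).toNat = 0 := by omega
    rw [inCommentLoopA, h0]
    simp only [dif_neg h, List.take_zero, List.foldl_nil]
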